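-- pv_equiv track=rewrite | github.com/sinjeanmin/cs702-a1-treatment | api/cp.py | get_company_code
-- ===== SOURCE A (Python) =====
-- def get_company_code(company):
--     c_code = None
--     meta = 0
--     amazon = 0
--     google = 0
--     for choice in company:
--         if choice == 'Meta':
--             meta += 1
--         elif choice == 'Amazon':
--             amazon += 1
--         elif choice == 'Google':
--             google += 1
--
--     if meta == 1 and amazon == 0 and google == 0: #meta only
--         c_code = 1
--     elif meta == 0 and amazon == 1 and google == 0: #amazon only
--         c_code = 2
--     elif meta == 0 and amazon == 0 and google == 1: #google only
--         c_code = 3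
--     elif meta == 1 and amazon == 1 and google == 0: #meta + amazon
--         c_code = 4
--     elif meta == 1 and amazon == 0 and google == 1: #meta + google
--         c_code = 5
--     elif meta == 0 and amazon == 1 and google == 1: #amazon + google
--         c_code = 6
--
--     return c_code
-- ===== SOURCE B (Python) =====
-- _CODES = (None, 1, 2, 4, 3, 5, 6, None)
-- _BITS = {'Meta': 1, 'Amazon': 2, 'Google': 4}
--
-- def get_company_code(company):
--     mask = 0
--     for choice in company:
--         bit = _BITS.get(choice, 0)
--         if mask & bit:
--             return None          # duplicate of a chosen company: no valid code
--         mask |= bit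
--     return _CODES[mask]
-- ===== Notes on version B (the rewrite author's own statement) =====
-- stated objective: alternative
-- what changed: Replaces the three-counter loop plus six-branch if/elif cascade by a single-pass bitmask accumulator with an early return on any duplicate choice and a fixed 8-entry code table indexed by the final mask.
import Mathlib
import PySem

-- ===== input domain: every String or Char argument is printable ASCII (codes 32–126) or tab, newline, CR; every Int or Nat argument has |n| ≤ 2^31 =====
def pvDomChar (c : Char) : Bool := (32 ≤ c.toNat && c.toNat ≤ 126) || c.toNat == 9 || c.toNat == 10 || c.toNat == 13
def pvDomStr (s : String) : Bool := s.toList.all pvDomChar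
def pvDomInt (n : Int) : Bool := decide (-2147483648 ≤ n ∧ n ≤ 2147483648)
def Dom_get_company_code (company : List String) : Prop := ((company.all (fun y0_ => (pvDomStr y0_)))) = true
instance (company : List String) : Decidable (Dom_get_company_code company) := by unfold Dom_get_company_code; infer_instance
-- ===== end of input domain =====

-- B replaces A's three-counter loop + six-branch cascade by a single-pass bitmask with
-- early return on a duplicate choice and a fixed 8-entry code table (objective: alternative).

-- ===== PORT A =====
def get_company_code (company : List String) : Option Int :=
  let s := company.foldl (fun (s : Int × Int × Int) choice =>
    if choice == "Meta" then (s.1 + 1, s.2.1, s.2.2)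
    else if choice == "Amazon" then (s.1, s.2.1 + 1, s.2.2)
    else if choice == "Google" then (s.1, s.2.1, s.2.2 + 1)
    else s) (0, 0, 0)
  let m := s.1; let a := s.2.1; let g := s.2.2
  if m = 1 ∧ a = 0 ∧ g = 0 then some 1
  else if m = 0 ∧ a = 1 ∧ g = 0 then some 2
  else if m = 0 ∧ a = 0 ∧ g = 1 then some 3
  else if m = 1 ∧ a = 1 ∧ g = 0 then some 4
  else if m = 1 ∧ a = 0 ∧ g = 1 then some 5
  else if m = 0 ∧ a = 1 ∧ g = 1 then some 6
  else none

-- ===== PORT B =====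
-- _BITS (the mask and bits are nonnegative small ints; ported as Nat)
def pvBitsD : PySem.Dict String Nat :=
  PySem.Dict.ofList [("Meta", 1), ("Amazon", 2), ("Google", 4)]

-- _CODES[mask]; the loop keeps mask in 0..7, so the tuple index is always in range
def pvCodes (mask : Nat) : Option Int :=
  if mask = 1 then some 1 else if mask = 2 then some 2 else if mask = 3 then some 4
  else if mask = 4 then some 3 else if mask = 5 then some 5 else if mask = 6 then some 6
  else none

-- B's loop: early 'return None' becomes the none branch of the recursion
def pvGoAlt : List String → Nat → Option Int
  | [], mask => pvCodes mask
  | choice :: rest, mask =>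
      let bit := PySem.Dict.getD pvBitsD choice 0
      if mask &&& bit ≠ 0 then none else pvGoAlt rest (mask ||| bit)

def get_company_code_alt (company : List String) : Option Int :=
  pvGoAlt company 0

-- ===== PRECONDITION & SPEC =====
def Spec_get_company_code (company : List String) (out : Option Int) : Prop := out = get_company_code_alt company
instance (company : List String) (out : Option Int) : Decidable (Spec_get_company_code company out) := by unfold Spec_get_company_code; infer_instance

-- ===== CLAIM (what is proved, stated in full; the proofs are below) =====
def Claim_equal_get_company_code : Prop := ∀ (company : List String), Dom_get_company_code company → Spec_get_company_code company (get_company_code company)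

-- ===== LEMMAS AND PROOFS =====

-- A's final cascade as a function of the three totals (proof-side helper)
def pvCascade (m a g : Int) : Option Int :=
  if m = 1 ∧ a = 0 ∧ g = 0 then some 1
  else if m = 0 ∧ a = 1 ∧ g = 0 then some 2
  else if m = 0 ∧ a = 0 ∧ g = 1 then some 3
  else if m = 1 ∧ a = 1 ∧ g = 0 then some 4
  else if m = 1 ∧ a = 0 ∧ g = 1 then some 5
  else if m = 0 ∧ a = 1 ∧ g = 1 then some 6
  else none

def pvMaskOf (bm ba bg : Bool) : Nat :=
  (if bm then 1 else 0) + (if ba then 2 else 0) + (if bg then 4 else 0)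

theorem pv_fold_counts (l : List String) (s : Int × Int × Int) :
    l.foldl (fun (s : Int × Int × Int) choice =>
      if choice == "Meta" then (s.1 + 1, s.2.1, s.2.2)
      else if choice == "Amazon" then (s.1, s.2.1 + 1, s.2.2)
      else if choice == "Google" then (s.1, s.2.1, s.2.2 + 1)
      else s) s
    = (s.1 + (l.count "Meta" : Int), s.2.1 + (l.count "Amazon" : Int), s.2.2 + (l.count "Google" : Int)) := by
  induction l generalizing s with
  | nil => simp
  | cons x xs ih =>
    rw [List.foldl_cons, ih]
    rcases s with ⟨m, a, g⟩
    by_cases hx : x = "Meta"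
    · subst hx; simp [Prod.ext_iff]; omega
    · by_cases ha : x = "Amazon"
      · subst ha; simp [Prod.ext_iff]; omega
      · by_cases hg : x = "Google"
        · subst hg; simp [Prod.ext_iff]; omega
        · simp [hx, ha, hg]

theorem pv_cascade_big (m a g : Int) (h : 2 ≤ m ∨ 2 ≤ a ∨ 2 ≤ g) : pvCascade m a g = none := by
  unfold pvCascade; split_ifs <;> first | rfl | (exfalso; omega)

theorem pv_goAlt_eq (l : List String) (bm ba bg : Bool) :
    pvGoAlt l (pvMaskOf bm ba bg)
      = pvCascade ((l.count "Meta" : Int) + (if bm then 1 else 0))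
                  ((l.count "Amazon" : Int) + (if ba then 1 else 0))
                  ((l.count "Google" : Int) + (if bg then 1 else 0)) := by
  induction l generalizing bm ba bg with
  | nil => cases bm <;> cases ba <;> cases bg <;> decide
  | cons x xs ih =>
    have hbm : PySem.Dict.getD pvBitsD "Meta" 0 = 1 := by decide
    have hba : PySem.Dict.getD pvBitsD "Amazon" 0 = 2 := by decide
    have hbg : PySem.Dict.getD pvBitsD "Google" 0 = 4 := by decide
    by_cases hm : x = "Meta"
    · subst hm
      cases bm with
      | true =>
        have hL : pvGoAlt ("Meta" :: xs) (pvMaskOf true ba bg) = none := by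
          cases ba <;> cases bg <;> simp [pvGoAlt, pvMaskOf, hbm]
        rw [hL, pv_cascade_big]
        left; simp; omega
      | false =>
        have hL : pvGoAlt ("Meta" :: xs) (pvMaskOf false ba bg)
            = pvGoAlt xs (pvMaskOf true ba bg) := by
          cases ba <;> cases bg <;> simp [pvGoAlt, pvMaskOf, hbm]
        rw [hL, ih]
        congr 1; simp
    · by_cases ha : x = "Amazon"
      · subst ha
        cases ba with
        | true =>
          have hL : pvGoAlt ("Amazon" :: xs) (pvMaskOf bm true bg) = none := by
            cases bm <;> cases bg <;> simp [pvGoAlt, pvMaskOf, hba]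
          rw [hL, pv_cascade_big]
          right; left; simp; omega
        | false =>
          have hL : pvGoAlt ("Amazon" :: xs) (pvMaskOf bm false bg)
              = pvGoAlt xs (pvMaskOf bm true bg) := by
            cases bm <;> cases bg <;> simp [pvGoAlt, pvMaskOf, hba]
          rw [hL, ih]
          congr 1; simp
      · by_cases hg : x = "Google"
        · subst hg
          cases bg with
          | true =>
            have hL : pvGoAlt ("Google" :: xs) (pvMaskOf bm ba true) = none := by
              cases bm <;> cases ba <;> simp [pvGoAlt, pvMaskOf, hbg]
            rw [hL, pv_cascade_big]
            right; right; simp; omega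
          | false =>
            have hL : pvGoAlt ("Google" :: xs) (pvMaskOf bm ba false)
                = pvGoAlt xs (pvMaskOf bm ba true) := by
              cases bm <;> cases ba <;> simp [pvGoAlt, pvMaskOf, hbg]
            rw [hL, ih]
            congr 1; simp
        · have hb : PySem.Dict.getD pvBitsD x 0 = 0 := by
            have hitems : pvBitsD.items = [("Meta", 1), ("Amazon", 2), ("Google", 4)] := by decide
            have h1 : ("Meta" == x) = false := by simpa using Ne.symm hm
            have h2 : ("Amazon" == x) = false := by simpa using Ne.symm ha
            have h3 : ("Google" == x) = false := by simpa using Ne.symm hg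
            rw [PySem.Dict.getD, PySem.Dict.get?, hitems]
            simp [List.find?, h1, h2, h3]
          have hL : pvGoAlt (x :: xs) (pvMaskOf bm ba bg)
              = pvGoAlt xs (pvMaskOf bm ba bg) := by
            cases bm <;> cases ba <;> cases bg <;> simp [pvGoAlt, pvMaskOf, hb]
          rw [hL, ih]
          simp [hm, ha, hg]

-- ===== VERDICT (by name: the statement is the Claim_ definition above) =====
theorem get_company_code_spec : Claim_equal_get_company_code := by
  intro company _
  unfold Spec_get_company_code get_company_code get_company_code_alt
  rw [pv_fold_counts]
  have h := pv_goAlt_eq company false false false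
  simp only [pvMaskOf, Bool.false_eq_true, if_false, add_zero] at h
  rw [h]
  simp [pvCascade]
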